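-- pv_equiv track=rewrite | github.com/pypi-data/pypi-mirror-67 | packages/DKCloudCommand/DKCloudCommand-1.1.164-py2.py3-none-any.whl/DKCloudCommand/modules/DKCloudCommandRunner.py | prepare_tree_kitchen_dict
-- ===== SOURCE A (Python) =====
-- def prepare_tree_kitchen_dict(kitchen_list):
--     ret = dict()
--     sorted_list = sorted(
--         kitchen_list, key=lambda j: j['name'].lower()
--     )  # sort the list, ignore case
--     for k in sorted_list:
--         # populate kitchen dict as pre condition to build the tree view
--         if k['name'] == k['parent-kitchen'] == u'master':
--             continue
--         aux_kitchen_list = ret.get(k['parent-kitchen'], None)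
--         if aux_kitchen_list is None:
--             aux_kitchen_list = []
--         aux_kitchen_list.append(k['name'])
--         ret[k['parent-kitchen']] = aux_kitchen_list
--     return ret
-- ===== SOURCE B (Python) =====
-- def prepare_tree_kitchen_dict(kitchen_list):
--     pairs = [(k['parent-kitchen'], k['name'])
--              for k in sorted(kitchen_list, key=lambda j: j['name'].lower())
--              if not (k['name'] == k['parent-kitchen'] == u'master')]
--     return {p: [n for q, n in pairs if q == p]
--             for p in dict.fromkeys(q for q, _ in pairs)}
-- ===== Notes on version B (the rewrite author's own statement) =====
-- stated objective: alternative
-- what changed: Replaces A's incremental get/append/assign dict loop with a declarative grouping: build the filtered (parent, name) pair list once, take the parents' ordered dedup as keys, and form each group by a per-key filtering comprehension.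
-- outside the precondition, e.g. on prepare_tree_kitchen_dict([{'name': 'a'}]): A raises KeyError, B raises KeyError
import Mathlib
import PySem

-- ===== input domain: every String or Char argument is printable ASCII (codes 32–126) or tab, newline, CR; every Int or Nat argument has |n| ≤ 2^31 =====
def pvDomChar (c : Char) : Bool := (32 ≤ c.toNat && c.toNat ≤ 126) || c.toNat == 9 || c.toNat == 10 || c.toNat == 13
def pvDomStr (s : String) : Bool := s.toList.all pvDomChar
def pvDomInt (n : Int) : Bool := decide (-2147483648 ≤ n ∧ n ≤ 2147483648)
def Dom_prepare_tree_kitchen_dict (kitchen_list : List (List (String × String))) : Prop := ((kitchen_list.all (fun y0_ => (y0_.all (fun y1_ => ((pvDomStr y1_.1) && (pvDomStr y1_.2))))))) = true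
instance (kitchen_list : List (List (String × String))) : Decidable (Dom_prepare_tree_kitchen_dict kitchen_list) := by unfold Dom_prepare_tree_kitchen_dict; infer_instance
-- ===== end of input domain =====

-- B groups the (parent, name) pairs by ordered key-dedup plus per-key filtering comprehensions
-- instead of A's incremental get/append/assign dict loop; objective: alternative decomposition, same cost class.

-- k[key] for an entry dict (first match; exact whenever the key is present, which Pre_ guarantees)
def kGet (k : List (String × String)) (key : String) : String :=
  ((k.find? (fun p => p.1 == key)).map (fun p => p.2)).getD ""

-- entry has a key (k[key] would not raise KeyError)
def kHas (k : List (String × String)) (key : String) : Bool :=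
  k.any (fun p => p.1 == key)

-- ===== PORT A =====
def prepare_tree_kitchen_dict (kitchen_list : List (List (String × String))) : List (String × List String) :=
  let sorted_list := PySem.List.sorted kitchen_list (fun j => PySem.Str.lower (kGet j "name")) false
  (sorted_list.foldl (fun ret k =>
      if kGet k "name" == kGet k "parent-kitchen" && kGet k "parent-kitchen" == "master" then ret
      else
        let aux := (ret.get? (kGet k "parent-kitchen")).getD []
        ret.insert (kGet k "parent-kitchen") (aux ++ [kGet k "name"]))
    PySem.Dict.empty).items

-- ===== PORT B =====
def prepare_tree_kitchen_dict_alt (kitchen_list : List (List (String × String))) : List (String × List String) :=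
  let pairs := (PySem.List.sorted kitchen_list (fun j => PySem.Str.lower (kGet j "name")) false).filterMap
      (fun k => if kGet k "name" == kGet k "parent-kitchen" && kGet k "parent-kitchen" == "master" then none
                else some (kGet k "parent-kitchen", kGet k "name"))
  (PySem.List.dedup (pairs.map (fun q => q.1))).map
    (fun p => (p, (pairs.filter (fun q => q.1 == p)).map (fun q => q.2)))

-- ===== PRECONDITION & SPEC =====
-- Pre_ excludes entries missing the 'name' or 'parent-kitchen' key, on which A raises KeyError.
def Pre_prepare_tree_kitchen_dict (kitchen_list : List (List (String × String))) : Prop :=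
  (kitchen_list.all (fun k => kHas k "name" && kHas k "parent-kitchen")) = true
instance (kitchen_list : List (List (String × String))) : Decidable (Pre_prepare_tree_kitchen_dict kitchen_list) := by unfold Pre_prepare_tree_kitchen_dict; infer_instance

def pvWitness_prepare_tree_kitchen_dict : (List (List (String × String))) :=
  [[("name", "b"), ("parent-kitchen", "master")],
   [("name", "A"), ("parent-kitchen", "b")],
   [("name", "master"), ("parent-kitchen", "master")]]

def Spec_prepare_tree_kitchen_dict (kitchen_list : List (List (String × String))) (out : List (String × List String)) : Prop := out = prepare_tree_kitchen_dict_alt kitchen_list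
instance (kitchen_list : List (List (String × String))) (out : List (String × List String)) : Decidable (Spec_prepare_tree_kitchen_dict kitchen_list out) := by unfold Spec_prepare_tree_kitchen_dict; infer_instance

-- ===== CLAIM (what is proved, stated in full; the proofs are below) =====
def Claim_equal_prepare_tree_kitchen_dict : Prop := ∀ (kitchen_list : List (List (String × String))), Dom_prepare_tree_kitchen_dict kitchen_list → Pre_prepare_tree_kitchen_dict kitchen_list → Spec_prepare_tree_kitchen_dict kitchen_list (prepare_tree_kitchen_dict kitchen_list)

-- ===== LEMMAS AND PROOFS =====

-- A's skip-or-update loop over a list equals the pure modify-append loop over its filterMapped (parent, name) pairs.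
theorem foldl_skip_eq_foldl_pairs (l : List (List (String × String)))
    (d : PySem.Dict String (List String)) :
    l.foldl (fun ret k =>
      if kGet k "name" == kGet k "parent-kitchen" && kGet k "parent-kitchen" == "master" then ret
      else
        let aux := (ret.get? (kGet k "parent-kitchen")).getD []
        ret.insert (kGet k "parent-kitchen") (aux ++ [kGet k "name"])) d
    = (l.filterMap (fun k =>
        if kGet k "name" == kGet k "parent-kitchen" && kGet k "parent-kitchen" == "master" then none
        else some (kGet k "parent-kitchen", kGet k "name"))).foldl
        (fun d p => d.modify p.1 [] (fun x => x ++ [p.2])) d := by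
  induction l generalizing d with
  | nil => rfl
  | cons k t ih =>
      simp only [List.foldl_cons, List.filterMap_cons]
      by_cases h : (kGet k "name" == kGet k "parent-kitchen" && kGet k "parent-kitchen" == "master") = true
      · rw [if_pos h, if_pos h]
        exact ih d
      · rw [if_neg h, if_neg h]
        simp only [List.foldl_cons]
        exact ih _

-- The modify-append loop's items ARE B's dedup-keys/filter-group table.
theorem foldl_pairs_items (pairs : List (String × String)) :
    (pairs.foldl (fun d p => d.modify p.1 [] (fun x => x ++ [p.2]))
        (PySem.Dict.empty : PySem.Dict String (List String))).items
    = (PySem.List.dedup (pairs.map (fun q => q.1))).map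
        (fun p => (p, (pairs.filter (fun q => q.1 == p)).map (fun q => q.2))) := by
  have hnd : (pairs.foldl (fun d p => d.modify p.1 [] (fun x => x ++ [p.2]))
      (PySem.Dict.empty : PySem.Dict String (List String))).keys.Nodup := by
    exact PySem.Dict.nodup_keys_foldl_modify_key pairs (fun p => p.1) []
      (fun _ p => (fun x => x ++ [p.2])) PySem.Dict.empty (by simp [pysem])
  rw [PySem.Dict.items_eq_map_keys _ hnd []]
  rw [PySem.Dict.keys_foldl_modify_key pairs (fun p => p.1) []
      (fun _ p => (fun x => x ++ [p.2])) PySem.Dict.empty]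
  simp only [PySem.Dict.keys_empty]
  have hk : PySem.Set.update ([] : List String) (pairs.map (fun q => q.1))
      = PySem.List.dedup (pairs.map (fun q => q.1)) := by
    simp only [PySem.List.dedup_eq_ofList, PySem.Set.ofList_eq_foldl]
    rfl
  rw [hk]
  refine List.map_congr_left (fun p _ => ?_)
  rw [PySem.Dict.getD_foldl_modify_append pairs PySem.Dict.empty p]
  simp [pysem]

-- ===== VERDICT (by name: the statement is the Claim_ definition above) =====
theorem prepare_tree_kitchen_dict_spec : Claim_equal_prepare_tree_kitchen_dict := by
  intro kl _ _
  show prepare_tree_kitchen_dict kl = prepare_tree_kitchen_dict_alt kl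
  simp only [prepare_tree_kitchen_dict, prepare_tree_kitchen_dict_alt]
  rw [foldl_skip_eq_foldl_pairs, foldl_pairs_items]
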